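-- pv_equiv track=rewrite | github.com/rumofek/chessNNEngine | dataCreation/gameServer.py | sortIndexes
-- ===== SOURCE A (Python) =====
-- def sortIndexes(predArr):
--     toReturn = []
--     for i in range(len(predArr)):
--         insertPos = i
--         while insertPos > 0 and predArr[i] >= predArr[insertPos]:
--             insertPos -= 1
--         toReturn.insert(insertPos, i)
--     return toReturn
-- ===== SOURCE B (Python) =====
-- def sortIndexes(predArr):
--     # Monotonic stack of previous-strictly-greater positions replaces A's inner backward scan.
--     toReturn = []
--     stack = []  # indices with strictly decreasing values, top = last
--     for i, v in enumerate(predArr):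
--         while stack and predArr[stack[-1]] <= v:
--             stack.pop()
--         pos = stack[-1] if stack else 0
--         stack.append(i)
--         toReturn.insert(pos, i)
--     return toReturn
-- ===== Notes on version B (the rewrite author's own statement) =====
-- stated objective: faster
-- what changed: A's inner backward scan over predArr for the previous strictly-greater position is replaced by a monotonic stack giving that position in amortized O(1); the positional inserts are unchanged.
import Mathlib
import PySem

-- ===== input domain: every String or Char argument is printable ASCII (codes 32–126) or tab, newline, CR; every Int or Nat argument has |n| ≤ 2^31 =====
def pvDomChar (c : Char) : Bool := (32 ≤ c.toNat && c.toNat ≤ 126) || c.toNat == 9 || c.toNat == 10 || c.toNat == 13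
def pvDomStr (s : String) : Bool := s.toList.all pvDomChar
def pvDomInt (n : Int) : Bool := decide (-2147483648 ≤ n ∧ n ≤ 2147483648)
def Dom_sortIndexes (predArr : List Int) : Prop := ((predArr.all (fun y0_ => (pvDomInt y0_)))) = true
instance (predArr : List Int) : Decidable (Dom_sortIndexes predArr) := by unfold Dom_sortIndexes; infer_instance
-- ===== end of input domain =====

-- B replaces A's quadratic inner backward scan by a monotonic stack; return value proved identical.

-- ===== PORT A =====
-- the inner 'while insertPos > 0 and predArr[i] >= predArr[insertPos]' loop; all indices are
-- in range 0..len-1, so plain getD is exact (no IndexError is reachable)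
def findPosA (a : List Int) (v : Int) : Nat → Nat
  | 0 => 0
  | j+1 => if a.getD (j+1) 0 ≤ v then findPosA a v j else j+1

-- insertPos satisfies 0 ≤ insertPos ≤ len(toReturn) at the insert, so List.insertIdx is exact
def sortIndexes (predArr : List Int) : List Int :=
  (List.range predArr.length).foldl
    (fun acc i => acc.insertIdx (findPosA predArr (predArr.getD i 0) i) (i : Int)) []

-- ===== PORT B =====
-- 'while stack and predArr[stack[-1]] <= v: stack.pop()'; stack head = Python stack[-1]
def popLe (a : List Int) (v : Int) : List Nat → List Nat
  | [] => []
  | j :: s => if a.getD j 0 ≤ v then popLe a v s else j :: s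

def sortIndexes_alt (predArr : List Int) : List Int :=
  ((PySem.List.enumerate predArr).foldl
    (fun (p : List Int × List Nat) iv =>
      let s := popLe predArr iv.2 p.2
      (p.1.insertIdx (s.headD 0) iv.1, iv.1.toNat :: s))
    ([], [])).1

-- ===== PRECONDITION & SPEC =====
def Spec_sortIndexes (predArr : List Int) (out : List Int) : Prop := out = sortIndexes_alt predArr
instance (predArr : List Int) (out : List Int) : Decidable (Spec_sortIndexes predArr out) := by unfold Spec_sortIndexes; infer_instance

-- ===== CLAIM (what is proved, stated in full; the proofs are below) =====
def Claim_equal_sortIndexes : Prop := ∀ (predArr : List Int), Dom_sortIndexes predArr → Spec_sortIndexes predArr (sortIndexes predArr)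

-- ===== LEMMAS AND PROOFS =====

-- popping with a smaller bound first changes nothing once we pop with the larger one
theorem popLe_popLe (a : List Int) (v w : Int) (h : w ≤ v) (s : List Nat) :
    popLe a v (popLe a w s) = popLe a v s := by
  induction s with
  | nil => rfl
  | cons j t ih =>
      by_cases hj : a.getD j 0 ≤ w
      · simp only [popLe, if_pos hj, if_pos (hj.trans h), ih]
      · simp only [popLe, if_neg hj]

def stepA (a : List Int) (acc : List Int) (i : Nat) : List Int :=
  acc.insertIdx (findPosA a (a.getD i 0) i) (i : Int)

def stepB (a : List Int) (p : List Int × List Nat) (iv : Int × Int) : List Int × List Nat :=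
  let s := popLe a iv.2 p.2
  (p.1.insertIdx (s.headD 0) iv.1, iv.1.toNat :: s)

def SB (a : List Int) (k : Nat) : List Int × List Nat :=
  ((List.range k).map (fun (i : Nat) => ((i : Int), a.getD i 0))).foldl (stepB a) ([], [])

theorem SB_succ (a : List Int) (k : Nat) :
    SB a (k+1) = stepB a (SB a k) ((k : Int), a.getD k 0) := by
  simp [SB, List.range_succ]

-- joint invariant: after k steps B's accumulator equals A's, and popping B's stack by any v
-- yields A's backward-scan position findPosA a v (k-1) as its head
theorem invariant (a : List Int) (k : Nat) :
    (SB a k).1 = (List.range k).foldl (stepA a) [] ∧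
    ∀ v : Int, ((popLe a v (SB a k).2).headD 0) = findPosA a v (k - 1) := by
  induction k with
  | zero => exact ⟨rfl, fun v => rfl⟩
  | succ k ih =>
      have hA : (List.range (k+1)).foldl (stepA a) [] =
          stepA a ((List.range k).foldl (stepA a) []) k := by
        simp [List.range_succ]
      obtain ⟨ih1, ih2⟩ := ih
      have hstack : ∀ v : Int, (popLe a v (SB a (k+1)).2).headD 0 = findPosA a v k := by
        intro v
        rw [SB_succ]
        show (popLe a v ((k : Int).toNat :: popLe a (a.getD k 0) (SB a k).2)).headD 0
            = findPosA a v k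
        rw [Int.toNat_natCast]
        by_cases hk : a.getD k 0 ≤ v
        · rw [popLe, if_pos hk, popLe_popLe a v (a.getD k 0) hk]
          cases k with
          | zero =>
              have h0 := ih2 v
              rw [h0]
          | succ m =>
              rw [ih2 v, Nat.add_sub_cancel, findPosA, if_pos hk]
        · rw [popLe, if_neg hk]
          cases k with
          | zero => rfl
          | succ m =>
              rw [findPosA, if_neg hk]
              rfl
      refine ⟨?_, fun v => by simpa using hstack v⟩
      rw [SB_succ, hA]
      show ((SB a k).1.insertIdx
          ((popLe a (a.getD k 0) (SB a k).2).headD 0) (k : Int), _).1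
          = stepA a ((List.range k).foldl (stepA a) []) k
      have hpos : (popLe a (a.getD k 0) (SB a k).2).headD 0
          = findPosA a (a.getD k 0) k := by
        cases k with
        | zero => rfl
        | succ m =>
            rw [ih2 (a.getD (m+1) 0), Nat.add_sub_cancel, findPosA, if_pos le_rfl]
      rw [ih1, hpos]
      rfl

theorem enumerate_eq (a : List Int) :
    PySem.List.enumerate a = (List.range a.length).map (fun (i : Nat) => ((i : Int), a.getD i 0)) := by
  induction a using List.reverseRecOn with
  | nil => simp [PySem.List.enumerate_nil]
  | append_singleton xs x ih =>
      rw [PySem.List.enumerate_append, ih]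
      simp [PySem.List.enumerate_nil, PySem.List.enumerate_cons, List.range_succ, List.getD]
      intro i hi
      simp [List.getElem?_append_left hi]

-- ===== VERDICT (by name: the statement is the Claim_ definition above) =====
theorem sortIndexes_spec : Claim_equal_sortIndexes := by
  intro a _
  show sortIndexes a = sortIndexes_alt a
  have h := (invariant a a.length).1
  rw [sortIndexes_alt, enumerate_eq]
  rw [sortIndexes]
  exact ((by rfl : ((List.range a.length).map (fun (i : Nat) => ((i : Int), a.getD i 0))).foldl (stepB a) ([], []) = SB a a.length) ▸ h).symm
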